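-- pv_equiv track=rewrite | github.com/seetj/practiceproblems | Codewars/Barista.py | barista
-- ===== SOURCE A (Python) =====
-- def barista(coffees):
--     total = []
--     clean_time = 2
--     coffees_sorted = sorted(coffees)
--     x = len(coffees)
--     for i in range(1,x):
--         z = 2 * i
--         total.append(z)
--     for i in coffees_sorted:
--         y = x * i
--         total.append(y)
--         x -= 1
--     return sum(total)
-- ===== SOURCE B (Python) =====
-- def barista(coffees):
--     n = len(coffees)
--     total = n * (n - 1)
--     prefix = 0
--     for c in sorted(coffees):
--         prefix += c
--         total += prefix
--     return total
-- ===== Notes on version B (the rewrite author's own statement) =====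
-- stated objective: simpler
-- what changed: Replaces the two append-to-list passes (a range loop plus a countdown-weight loop, then sum) by the closed form n*(n-1) and a single prefix-sum pass over the sorted list, using that the descending-weight sum equals the sum of prefix sums.
import Mathlib
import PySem

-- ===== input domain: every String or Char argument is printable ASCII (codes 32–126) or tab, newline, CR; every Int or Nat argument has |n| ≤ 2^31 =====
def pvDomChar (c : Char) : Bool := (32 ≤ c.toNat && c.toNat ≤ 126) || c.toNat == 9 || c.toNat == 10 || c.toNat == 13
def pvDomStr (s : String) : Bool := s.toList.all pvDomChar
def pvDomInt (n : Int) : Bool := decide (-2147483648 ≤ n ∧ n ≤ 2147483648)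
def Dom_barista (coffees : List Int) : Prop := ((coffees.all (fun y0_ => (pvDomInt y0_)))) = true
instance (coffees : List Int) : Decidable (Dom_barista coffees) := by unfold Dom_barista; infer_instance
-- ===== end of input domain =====

-- B replaces A's two list-building passes with the closed form n*(n-1) plus one prefix-sum pass (simpler, same cost).


-- ===== PORT A =====
def barista (coffees : List Int) : Int :=
  let total : List Int := []
  let coffees_sorted := PySem.List.sorted coffees (fun x => x) false
  let x : Int := coffees.length
  let total := total ++ (PySem.List.pyRange 1 x 1).map (fun i => 2 * i)
  let st := coffees_sorted.foldl (fun (st : List Int × Int) i => (st.1 ++ [st.2 * i], st.2 - 1)) (total, x)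
  st.1.sum

-- ===== PORT B =====
def barista_alt (coffees : List Int) : Int :=
  let n : Int := coffees.length
  let st := (PySem.List.sorted coffees (fun x => x) false).foldl
    (fun (st : Int × Int) c => (st.1 + (st.2 + c), st.2 + c)) (n * (n - 1), 0)
  st.1

-- ===== PRECONDITION & SPEC =====
def Spec_barista (coffees : List Int) (out : Int) : Prop := out = barista_alt coffees
instance (coffees : List Int) (out : Int) : Decidable (Spec_barista coffees out) := by unfold Spec_barista; infer_instance

-- ===== CLAIM (what is proved, stated in full; the proofs are below) =====
def Claim_equal_barista : Prop := ∀ (coffees : List Int), Dom_barista coffees → Spec_barista coffees (barista coffees)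

-- ===== LEMMAS AND PROOFS =====

-- weighted sum with weights x, x-1, x-2, …
def pvW : List Int → Int → Int
  | [], _ => 0
  | c :: l, x => x * c + pvW l (x - 1)

theorem pvSumA (l : List Int) : ∀ (t : List Int) (x : Int),
    ((l.foldl (fun (st : List Int × Int) i => (st.1 ++ [st.2 * i], st.2 - 1)) (t, x)).1).sum
      = t.sum + pvW l x := by
  induction l with
  | nil => intro t x; simp [pvW]
  | cons c l ih =>
    intro t x
    simp only [List.foldl_cons, pvW]
    rw [ih]
    simp
    ring

theorem pvSumB (l : List Int) : ∀ (t p : Int),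
    (l.foldl (fun (st : Int × Int) c => (st.1 + (st.2 + c), st.2 + c)) (t, p)).1
      = t + p * l.length + pvW l l.length := by
  induction l with
  | nil => intro t p; simp [pvW]
  | cons c l ih =>
    intro t p
    simp only [List.foldl_cons, pvW, List.length_cons]
    rw [ih]
    push_cast
    rw [add_sub_cancel_right]
    ring

theorem pvRangeSum (n : ℕ) :
    ((PySem.List.pyRange 1 (n : Int) 1).map (fun i => 2 * i)).sum = (n : Int) * ((n : Int) - 1) := by
  induction n with
  | zero => simp [PySem.List.pyRange_one_eq_nil]
  | succ m ih =>
    rcases Nat.eq_zero_or_pos m with hm | hm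
    · subst hm; decide
    have hc : ((m + 1 : ℕ) : Int) = (m : Int) + 1 := by norm_cast
    rw [hc, PySem.List.pyRange_one_succ_right (by exact_mod_cast hm)]
    simp only [List.map_append, List.sum_append, List.map_cons, List.map_nil, List.sum_cons,
      List.sum_nil]
    rw [ih]
    push_cast
    rw [add_sub_cancel_right]
    ring

-- ===== VERDICT (by name: the statement is the Claim_ definition above) =====
theorem barista_spec : Claim_equal_barista := by
  intro coffees _
  unfold Spec_barista barista barista_alt
  simp only []
  rw [pvSumA, pvSumB]
  have hlen : (PySem.List.sorted coffees (fun x => x) false).length = coffees.length :=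
    PySem.List.length_sorted coffees _ _
  rw [hlen]
  simp only [List.nil_append]
  rw [pvRangeSum coffees.length]
  ring
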